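-- pv_equiv track=rewrite | github.com/biobenkj/tempest | tempest/data/simulator.py | _regions_from_labels
-- ===== SOURCE A (Python) =====
-- from typing import List, Dict, Tuple, Optional, Union, Any, Callable
--
-- def _regions_from_labels(
--
--     labels: List[str],
--     exclude: Optional[set] = None
-- ) -> Dict[str, List[Tuple[int, int]]]:
--     """
--     Recompute compressed segments from labels after error editing.
--     Excludes ephemeral labels such as "ERROR".
--
--     Args:
--         labels: List of per-base labels
--         exclude: Set of labels to exclude (e.g., {"ERROR"})
--
--     Returns:
--         Dictionary mapping label names to list of (start, end) tuples
--     """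
--     exclude = exclude or set()
--     out = {}
--     i, n = 0, len(labels)
--     while i < n:
--         lab = labels[i]
--         if lab in exclude:
--             i += 1
--             continue
--         j = i + 1
--         while j < n and labels[j] == lab:
--             j += 1
--         out.setdefault(lab, []).append((i, j))
--         i = j
--     return out
-- ===== SOURCE B (Python) =====
-- def _regions_from_labels(labels, exclude=None):
--     """Two-pass rewrite: run-length encode the labels, then emit segments."""
--     exclude = exclude or set()
--     runs = []
--     for lab in labels:
--         if runs and runs[-1][0] == lab:
--             runs[-1][1] += 1
--         else:
--             runs.append([lab, 1])
--     out = {}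
--     pos = 0
--     for lab, cnt in runs:
--         if lab not in exclude:
--             out.setdefault(lab, []).append((pos, pos + cnt))
--         pos += cnt
--     return out
-- ===== Notes on version B (the rewrite author's own statement) =====
-- stated objective: simpler
-- what changed: Replaces A's index-based outer/inner while-loop scan with a two-pass decomposition: run-length encode the labels, then a single pass over the runs with a position counter emits the segments.
import Mathlib
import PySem

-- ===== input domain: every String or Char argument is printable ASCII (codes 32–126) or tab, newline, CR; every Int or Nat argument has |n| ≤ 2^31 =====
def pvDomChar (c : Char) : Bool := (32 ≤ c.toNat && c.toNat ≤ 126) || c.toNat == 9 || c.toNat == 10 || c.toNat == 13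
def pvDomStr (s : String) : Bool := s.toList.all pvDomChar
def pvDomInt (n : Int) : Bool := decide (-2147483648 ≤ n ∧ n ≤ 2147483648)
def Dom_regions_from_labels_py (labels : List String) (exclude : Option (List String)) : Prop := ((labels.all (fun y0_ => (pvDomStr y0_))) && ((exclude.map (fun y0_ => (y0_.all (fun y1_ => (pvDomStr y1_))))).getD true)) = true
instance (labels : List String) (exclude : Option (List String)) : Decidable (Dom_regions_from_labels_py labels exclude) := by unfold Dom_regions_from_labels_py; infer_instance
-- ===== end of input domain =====

-- B replaces A's index-juggling nested while-loops by a two-pass decomposition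
-- (run-length encode, then emit segments with a position counter); objective: simpler.

-- ===== PORT A =====
-- inner `while j < n and labels[j] == lab: j += 1`
def runEndA (labels : List String) (lab : String) (n j : Nat) : Nat :=
  if _h : j < n ∧ labels.getD j "" = lab then runEndA labels lab n (j + 1) else j
termination_by n - j
decreasing_by omega

-- termination helper for the outer loop (the outer loop cites it by name)
theorem runEndA_ge (labels : List String) (lab : String) (n j : Nat) :
    j ≤ runEndA labels lab n j := by
  rw [runEndA]
  split
  · exact Nat.le_trans (by omega) (runEndA_ge labels lab n (j + 1))
  · exact Nat.le_refl j
termination_by n - j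
decreasing_by omega

-- outer `while i < n`
def loopA (labels excl : List String) (n i : Nat)
    (out : PySem.Dict String (List (Int × Int))) : PySem.Dict String (List (Int × Int)) :=
  if _h : i < n then
    let lab := labels.getD i ""
    if excl.contains lab then loopA labels excl n (i + 1) out
    else
      let j := runEndA labels lab n (i + 1)
      loopA labels excl n j (out.insert lab (out.getD lab [] ++ [((i : Int), (j : Int))]))
  else out
termination_by n - i
decreasing_by
  · omega
  · have := runEndA_ge labels (labels.getD i "") n (i + 1); omega

def regions_from_labels_py (labels : List String) (exclude : Option (List String)) :
    List (String × List (Int × Int)) :=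
  (loopA labels (exclude.getD []) labels.length 0 PySem.Dict.empty).items

-- ===== PORT B =====
-- body of B's first loop: extend/refresh the last run
def rleStep (runs : List (String × Int)) (lab : String) : List (String × Int) :=
  match runs.getLast? with
  | some (k, c) => if k = lab then runs.dropLast ++ [(k, c + 1)] else runs ++ [(lab, 1)]
  | none => [(lab, 1)]

-- body of B's second loop: emit a segment for a non-excluded run, advance pos
def stepB (excl : List String) (st : Int × PySem.Dict String (List (Int × Int)))
    (kc : String × Int) : Int × PySem.Dict String (List (Int × Int)) :=
  (st.1 + kc.2,
   if excl.contains kc.1 then st.2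
   else st.2.insert kc.1 (st.2.getD kc.1 [] ++ [(st.1, st.1 + kc.2)]))

def regions_from_labels_py_alt (labels : List String) (exclude : Option (List String)) :
    List (String × List (Int × Int)) :=
  let excl := exclude.getD []
  let runs := labels.foldl rleStep []
  (runs.foldl (stepB excl) (0, PySem.Dict.empty)).2.items

-- ===== PRECONDITION & SPEC =====
def Spec_regions_from_labels_py (labels : List String) (exclude : Option (List String)) (out : List (String × List (Int × Int))) : Prop := out = regions_from_labels_py_alt labels exclude
instance (labels : List String) (exclude : Option (List String)) (out : List (String × List (Int × Int))) : Decidable (Spec_regions_from_labels_py labels exclude out) := by unfold Spec_regions_from_labels_py; infer_instance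

-- ===== CLAIM (what is proved, stated in full; the proofs are below) =====
def Claim_equal_regions_from_labels_py : Prop := ∀ (labels : List String) (exclude : Option (List String)), Dom_regions_from_labels_py labels exclude → Spec_regions_from_labels_py labels exclude (regions_from_labels_py labels exclude)

-- ===== LEMMAS AND PROOFS =====

-- canonical run-length encoding (proof-only reference form)
def runsOf : List String → List (String × Int)
  | [] => []
  | a :: t =>
      (a, 1 + ((t.takeWhile (· == a)).length : Int)) :: runsOf (t.dropWhile (· == a))
termination_by l => l.length
decreasing_by
  have := List.length_dropWhile_le (· == a) t
  simp; omega

-- reference form of B's second loop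
def loopRuns (excl : List String) :
    List (String × Int) → Int → PySem.Dict String (List (Int × Int)) →
    PySem.Dict String (List (Int × Int))
  | [], _, out => out
  | (k, c) :: t, pos, out =>
      loopRuns excl t (pos + c)
        (if excl.contains k then out else out.insert k (out.getD k [] ++ [(pos, pos + c)]))

theorem rleStep_concat (rs : List (String × Int)) (k : String) (c : Int) (lab : String) :
    rleStep (rs ++ [(k, c)]) lab =
      if k = lab then rs ++ [(k, c + 1)] else rs ++ [(k, c), (lab, 1)] := by
  simp [rleStep]

theorem rleStep_singleton (k : String) (c : Int) (lab : String) :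
    rleStep [(k, c)] lab = if k = lab then [(k, c + 1)] else [(k, c), (lab, 1)] := by
  simpa using rleStep_concat [] k c lab

theorem rle_prefix (t : List String) : ∀ (rs : List (String × Int)) (k : String) (c : Int),
    List.foldl rleStep (rs ++ [(k, c)]) t = rs ++ List.foldl rleStep [(k, c)] t := by
  induction t with
  | nil => intro rs k c; simp
  | cons a t ih =>
    intro rs k c
    by_cases h : k = a
    · rw [List.foldl_cons, List.foldl_cons, rleStep_concat, rleStep_singleton,
        if_pos h, if_pos h]
      exact ih rs k (c + 1)
    · rw [List.foldl_cons, List.foldl_cons, rleStep_concat, rleStep_singleton,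
        if_neg h, if_neg h,
        show rs ++ [(k, c), (a, 1)] = (rs ++ [(k, c)]) ++ [(a, 1)] by simp,
        ih (rs ++ [(k, c)]) a 1,
        show ([(k, c), (a, 1)] : List (String × Int)) = [(k, c)] ++ [(a, 1)] from rfl,
        ih [(k, c)] a 1]
      simp

theorem rle_single (t : List String) : ∀ (k : String) (c : Int),
    List.foldl rleStep [(k, c)] t =
      (k, c + ((t.takeWhile (· == k)).length : Int)) :: runsOf (t.dropWhile (· == k)) := by
  induction t with
  | nil => intro k c; simp [runsOf]
  | cons a t ih =>
    intro k c
    by_cases h : k = a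
    · subst h
      rw [List.foldl_cons, rleStep_singleton, if_pos rfl, ih k (c + 1)]
      simp only [List.takeWhile_cons, List.dropWhile_cons, BEq.rfl, if_pos trivial,
        List.length_cons]
      push_cast
      ring_nf
    · have hba : (a == k) = false := by simpa using Ne.symm h
      rw [List.foldl_cons, rleStep_singleton, if_neg h,
        show ([(k, c), (a, 1)] : List (String × Int)) = [(k, c)] ++ [(a, 1)] from rfl,
        rle_prefix t [(k, c)] a 1, ih a 1]
      simp [List.takeWhile_cons, List.dropWhile_cons, hba, runsOf]

theorem rle_eq_runsOf (labels : List String) :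
    labels.foldl rleStep [] = runsOf labels := by
  cases labels with
  | nil => simp [runsOf]
  | cons a t =>
    show List.foldl rleStep (rleStep [] a) t = _
    rw [show rleStep [] a = [(a, 1)] from rfl, rle_single t a 1, runsOf]

-- `dropWhile` is `drop` of the takeWhile length
theorem dropWhile_eq_drop (p : String → Bool) (l : List String) :
    l.dropWhile p = l.drop (l.takeWhile p).length := by
  induction l with
  | nil => rfl
  | cons a t ih =>
    by_cases h : p a
    · simp [List.dropWhile_cons, List.takeWhile_cons, h, ih]
    · simp [List.dropWhile_cons, List.takeWhile_cons, h]

-- the inner while finds the end of the current run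
theorem runEndA_eq (labels : List String) (lab : String) (j : Nat)
    (hj : j ≤ labels.length) :
    runEndA labels lab labels.length j =
      j + ((labels.drop j).takeWhile (· == lab)).length := by
  rw [runEndA]
  split
  · rename_i h
    obtain ⟨hlt, heq⟩ := h
    rw [List.drop_eq_getElem_cons hlt, List.takeWhile_cons]
    rw [List.getD_eq_getElem?_getD, List.getElem?_eq_getElem hlt] at heq
    simp only [Option.getD_some] at heq
    simp only [heq, BEq.rfl, if_pos trivial, List.length_cons]
    rw [runEndA_eq labels lab (j + 1) (by omega)]
    omega
  · rename_i h
    rcases Nat.lt_or_ge j labels.length with hlt | hge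
    · have hne : labels.getD j "" ≠ lab := fun hc => h ⟨hlt, hc⟩
      rw [List.getD_eq_getElem?_getD, List.getElem?_eq_getElem hlt] at hne
      simp only [Option.getD_some] at hne
      rw [List.drop_eq_getElem_cons hlt, List.takeWhile_cons]
      simp [hne]
    · rw [List.drop_eq_nil_of_le hge]
      simp
termination_by labels.length - j
decreasing_by omega

-- a whole excluded run may be skipped at once
theorem loopRuns_skip (excl : List String) (l : List String) (a : String)
    (ha : excl.contains a = true) (p : Int) (out : PySem.Dict String (List (Int × Int))) :
    loopRuns excl (runsOf l) p out =
      loopRuns excl (runsOf (l.dropWhile (· == a))) (p + ((l.takeWhile (· == a)).length : Int)) out := by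
  cases l with
  | nil => simp [List.takeWhile_nil, List.dropWhile_nil]
  | cons b t =>
    by_cases h : b = a
    · subst h
      rw [runsOf]
      simp only [List.takeWhile_cons, List.dropWhile_cons, BEq.rfl, if_pos trivial,
        List.length_cons]
      rw [loopRuns, if_pos ha]
      push_cast
      ring_nf
    · have hba : (b == a) = false := by simpa using h
      simp [List.takeWhile_cons, List.dropWhile_cons, hba]

-- A's outer loop, on the suffix from i, is the run loop over the runs of that suffix
theorem loopA_eq (labels excl : List String) (i : Nat) (hi : i ≤ labels.length)
    (out : PySem.Dict String (List (Int × Int))) :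
    loopA labels excl labels.length i out =
      loopRuns excl (runsOf (labels.drop i)) (i : Int) out := by
  rw [loopA]
  split
  · rename_i hlt
    have hget : labels.getD i "" = labels[i] := by
      rw [List.getD_eq_getElem?_getD, List.getElem?_eq_getElem hlt]; rfl
    have hdrop : labels.drop i = labels[i] :: labels.drop (i + 1) :=
      List.drop_eq_getElem_cons hlt
    set lab := labels[i] with hlab
    have hTW : ((labels.drop (i + 1)).takeWhile (· == lab)).length ≤ labels.length - (i + 1) := by
      have h1 := (List.takeWhile_prefix (l := labels.drop (i + 1)) (p := (· == lab))).length_le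
      simp only [List.length_drop] at h1
      omega
    by_cases hex : excl.contains lab = true
    · simp only [hget, hex, if_pos rfl]
      rw [loopA_eq labels excl (i + 1) (by omega) out,
        loopRuns_skip excl (labels.drop (i + 1)) lab hex,
        hdrop, runsOf, loopRuns, if_pos hex]
      push_cast
      ring_nf
    · simp only [hget, hex]
      rw [if_neg (by simpa using hex)]
      have hrun := runEndA_eq labels lab (i + 1) (by omega)
      rw [hrun]
      rw [loopA_eq labels excl _ (by omega) _]
      rw [hdrop, runsOf, loopRuns, if_neg (by simpa using hex)]
      rw [show labels.drop (i + 1 + ((labels.drop (i + 1)).takeWhile (· == lab)).length)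
            = (labels.drop (i + 1)).drop ((labels.drop (i + 1)).takeWhile (· == lab)).length by
          rw [List.drop_drop],
        ← dropWhile_eq_drop]
      push_cast
      ring_nf
  · rename_i hge
    have : i = labels.length := by omega
    subst this
    simp [runsOf, loopRuns]
termination_by labels.length - i
decreasing_by
  · omega
  · have := runEndA_ge labels (labels.getD i "") labels.length (i + 1); omega

-- B's fold is the run loop
theorem foldB_eq (excl : List String) (runs : List (String × Int)) :
    ∀ (p : Int) (out : PySem.Dict String (List (Int × Int))),
    (runs.foldl (stepB excl) (p, out)).2 = loopRuns excl runs p out := by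
  induction runs with
  | nil => intro p out; rfl
  | cons kc t ih =>
    intro p out
    obtain ⟨k, c⟩ := kc
    simp only [List.foldl_cons, stepB, loopRuns]
    exact ih (p + c) _

-- ===== VERDICT (by name: the statement is the Claim_ definition above) =====
theorem regions_from_labels_py_spec : Claim_equal_regions_from_labels_py := by
  intro labels exclude _
  unfold Spec_regions_from_labels_py regions_from_labels_py
  rw [loopA_eq labels (exclude.getD []) 0 (by omega) PySem.Dict.empty]
  show (loopRuns (exclude.getD []) (runsOf (labels.drop 0)) ((0 : Nat) : Int) PySem.Dict.empty).items
      = (List.foldl (stepB (exclude.getD [])) (0, PySem.Dict.empty) (labels.foldl rleStep [])).2.items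
  rw [rle_eq_runsOf, foldB_eq, List.drop_zero, Nat.cast_zero]
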